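-- pv_equiv track=rewrite | github.com/aengus-signal4/signal4-core | src/processing_steps/stitch_steps/stage10_resolutions.py | _format_context_words
-- ===== SOURCE A (Python) =====
-- from typing import Dict, Any, List, Optional, Tuple
--
-- def _format_context_words(words: List[Dict]) -> str:
--     """Format context words for display."""
--     if not words:
--         return ""
--
--     # Group by speaker for cleaner display
--     result = ""
--     current_speaker = None
--     current_text = []
--
--     for word in words:
--         speaker = word.get('speaker', 'UNKNOWN')
--         if speaker != current_speaker:
--             if current_text:
--                 speaker_label = current_speaker if current_speaker not in ['UNKNOWN', 'MULTI_SPEAKER'] else '?'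
--                 result += f"[{speaker_label}] {' '.join(current_text)} "
--             current_speaker = speaker
--             current_text = [word['word']]
--         else:
--             current_text.append(word['word'])
--
--     # Add last group
--     if current_text:
--         speaker_label = current_speaker if current_speaker not in ['UNKNOWN', 'MULTI_SPEAKER'] else '?'
--         result += f"[{speaker_label}] {' '.join(current_text)}"
--
--     return result.strip()
-- ===== SOURCE B (Python) =====
-- def _piece(prev, w):
--     """Local contribution of one word given only the previous word's speaker."""
--     s = w.get('speaker', 'UNKNOWN')
--     if s == prev:
--         return ' ' + w['word']
--     lbl = s if s not in ('UNKNOWN', 'MULTI_SPEAKER') else '?'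
--     head = '[' + lbl + '] ' + w['word']
--     return head if prev is None else ' ' + head
--
-- def _format_context_words(words):
--     """Format context words for display (stateless per-word map over predecessor pairs)."""
--     prevs = [None] + [w.get('speaker', 'UNKNOWN') for w in words[:-1]]
--     return ''.join(_piece(p, w) for p, w in zip(prevs, words)).strip()
-- ===== Notes on version B (the rewrite author's own statement) =====
-- stated objective: alternative
-- what changed: Replaces A's run-accumulating state machine (current_speaker/current_text/result with flush-on-change) by a stateless per-word map: each word is paired with its predecessor's speaker and mapped locally to its string piece (new-group header or space-prefixed word), then the pieces are concatenated and stripped; no group list or mutable accumulator exists.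
import Mathlib
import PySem

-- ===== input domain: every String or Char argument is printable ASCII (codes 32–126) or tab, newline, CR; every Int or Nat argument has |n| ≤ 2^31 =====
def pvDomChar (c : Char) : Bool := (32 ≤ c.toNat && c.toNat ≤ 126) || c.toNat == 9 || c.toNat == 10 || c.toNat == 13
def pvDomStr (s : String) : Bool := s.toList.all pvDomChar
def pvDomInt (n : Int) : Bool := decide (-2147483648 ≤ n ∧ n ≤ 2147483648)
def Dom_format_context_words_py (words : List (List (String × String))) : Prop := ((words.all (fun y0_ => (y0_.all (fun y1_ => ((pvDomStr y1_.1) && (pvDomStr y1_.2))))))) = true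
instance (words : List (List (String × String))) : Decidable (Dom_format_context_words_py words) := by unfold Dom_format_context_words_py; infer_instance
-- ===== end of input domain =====

-- B replaces A's run-accumulating state machine by a stateless per-word map over
-- (predecessor speaker, word) pairs, joined with '' and stripped; same return value on Pre_.

-- shared primitive accessors (word.get('speaker','UNKNOWN') and word['word'])
def pvSpk (w : List (String × String)) : String := PySem.Dict.getD (PySem.Dict.mk w) "speaker" "UNKNOWN"
-- word['word']: Python raises KeyError when the key is missing; Pre_ excludes that, default unreachable
def pvWord (w : List (String × String)) : String := ((PySem.Dict.mk w).get? "word").getD ""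

-- ===== PORT A =====
def pvLabel : Option String → String
  | some s => if s = "UNKNOWN" || s = "MULTI_SPEAKER" then "?" else s
  | none => "None"  -- unreachable: A flushes only with nonempty current_text

def pvLoopA : List (List (String × String)) → String → Option String → List String → String
  | [], result, cur, text =>
      -- the "Add last group" tail of A
      if text ≠ [] then result ++ "[" ++ pvLabel cur ++ "] " ++ PySem.Str.join " " text
      else result
  | w :: ws, result, cur, text =>
      let speaker := pvSpk w
      if some speaker ≠ cur then
        let result' :=
          if text ≠ [] then result ++ "[" ++ pvLabel cur ++ "] " ++ PySem.Str.join " " text ++ " "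
          else result
        pvLoopA ws result' (some speaker) [pvWord w]
      else
        pvLoopA ws result cur (text ++ [pvWord w])

def format_context_words_py (words : List (List (String × String))) : String :=
  if words = [] then "" else PySem.Str.strip (pvLoopA words "" none [])

-- ===== PORT B =====
def pvPieceB (prev : Option String) (w : List (String × String)) : String :=
  let s := pvSpk w
  if some s = prev then " " ++ pvWord w
  else
    let lbl := if s = "UNKNOWN" || s = "MULTI_SPEAKER" then "?" else s
    let head := "[" ++ lbl ++ "] " ++ pvWord w
    match prev with
    | none => head
    | some _ => " " ++ head

def format_context_words_py_alt (words : List (List (String × String))) : String :=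
  let prevs : List (Option String) := none :: words.dropLast.map (fun w => some (pvSpk w))
  PySem.Str.strip (PySem.Str.join "" ((prevs.zip words).map (fun pw => pvPieceB pw.1 pw.2)))

-- ===== PRECONDITION & SPEC =====
-- Pre_ excludes exactly the inputs where A raises KeyError: some word dict lacks the 'word' key.
def Pre_format_context_words_py (words : List (List (String × String))) : Prop :=
  ∀ w ∈ words, ((PySem.Dict.mk w).get? "word").isSome = true
instance (words : List (List (String × String))) : Decidable (Pre_format_context_words_py words) := by
  unfold Pre_format_context_words_py; infer_instance

def pvWitness_format_context_words_py : (List (List (String × String))) :=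
  [[("speaker", "A"), ("word", "hi")], [("word", "there")]]

def Spec_format_context_words_py (words : List (List (String × String))) (out : String) : Prop := out = format_context_words_py_alt words
instance (words : List (List (String × String))) (out : String) : Decidable (Spec_format_context_words_py words out) := by unfold Spec_format_context_words_py; infer_instance

-- ===== CLAIM (what is proved, stated in full; the proofs are below) =====
def Claim_equal_format_context_words_py : Prop := ∀ (words : List (List (String × String))), Dom_format_context_words_py words → Pre_format_context_words_py words → Spec_format_context_words_py words (format_context_words_py words)

-- ===== LEMMAS AND PROOFS =====

-- chain form of B's piece list: carries the previous speaker structurally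
def pvChain : Option String → List (List (String × String)) → List String
  | _, [] => []
  | prev, w :: ws => pvPieceB prev w :: pvChain (some (pvSpk w)) ws

theorem pv_zip_eq_chain (ws : List (List (String × String))) (prev : Option String) :
    (((prev :: ws.dropLast.map (fun w => some (pvSpk w))).zip ws).map
        (fun pw => pvPieceB pw.1 pw.2)) = pvChain prev ws := by
  induction ws generalizing prev with
  | nil => simp [pvChain]
  | cons w ws ih =>
    cases ws with
    | nil => simp [pvChain]
    | cons v vs =>
      simp only [List.dropLast_cons_of_ne_nil (by simp : v :: vs ≠ []), List.map_cons,
        List.zip_cons_cons, List.map_cons, pvChain]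
      exact congrArg _ (ih (some (pvSpk w)))

theorem pv_joinE_cons (a : String) (rest : List String) :
    PySem.Str.join "" (a :: rest) = a ++ PySem.Str.join "" rest := by
  apply String.toList_injective
  cases rest with
  | nil => simp [PySem.Str.join, PySem.Chars.join, List.intercalate]
  | cons b bs => simp [PySem.Str.join, PySem.Chars.join_cons_cons]

theorem pv_join_snoc (text : List String) (x : String) (h : text ≠ []) :
    PySem.Str.join " " (text ++ [x]) = PySem.Str.join " " text ++ " " ++ x := by
  induction text with
  | nil => exact absurd rfl h
  | cons t ts ih =>
    cases ts with
    | nil =>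
      apply String.toList_injective
      simp [PySem.Str.join, PySem.Chars.join_cons_cons]
    | cons u us =>
      apply String.toList_injective
      have := congrArg String.toList (ih (by simp))
      simp [PySem.Str.join, PySem.Chars.join_cons_cons] at this ⊢
      simp [this]

theorem pv_alt_eq (words : List (List (String × String))) :
    format_context_words_py_alt words
      = PySem.Str.strip (PySem.Str.join "" (pvChain none words)) := by
  show PySem.Str.strip (PySem.Str.join ""
      ((((none :: words.dropLast.map (fun w => some (pvSpk w))).zip words).map
        (fun pw => pvPieceB pw.1 pw.2)))) = _
  rw [pv_zip_eq_chain]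

theorem pv_loop_chain (ws : List (List (String × String))) (s : String) (text : List String)
    (result : String) (h : text ≠ []) :
    pvLoopA ws result (some s) text =
      result ++ "[" ++ pvLabel (some s) ++ "] " ++ PySem.Str.join " " text ++
        PySem.Str.join "" (pvChain (some s) ws) := by
  induction ws generalizing s text result with
  | nil =>
    apply String.toList_injective
    simp [pvLoopA, h, pvChain, PySem.Str.join, PySem.Chars.join, List.intercalate]
  | cons w ws ih =>
    by_cases hc : pvSpk w = s
    · rw [show pvLoopA (w :: ws) result (some s) text
            = pvLoopA ws result (some s) (text ++ [pvWord w]) by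
          simp [pvLoopA, hc]]
      rw [ih s (text ++ [pvWord w]) result (by simp)]
      rw [show pvChain (some s) (w :: ws) = pvPieceB (some s) w :: pvChain (some s) ws by
          simp [pvChain, hc]]
      rw [pv_joinE_cons, pv_join_snoc text (pvWord w) h]
      have hp : pvPieceB (some s) w = " " ++ pvWord w := by simp [pvPieceB, hc]
      rw [hp]
      apply String.toList_injective
      simp
    · rw [show pvLoopA (w :: ws) result (some s) text
            = pvLoopA ws (result ++ "[" ++ pvLabel (some s) ++ "] " ++ PySem.Str.join " " text ++ " ")
                (some (pvSpk w)) [pvWord w] by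
          simp [pvLoopA, hc, h]]
      rw [ih (pvSpk w) [pvWord w] _ (by simp)]
      rw [show pvChain (some s) (w :: ws) = pvPieceB (some s) w :: pvChain (some (pvSpk w)) ws from
          rfl]
      rw [pv_joinE_cons]
      have hp : pvPieceB (some s) w
          = " " ++ ("[" ++ pvLabel (some (pvSpk w)) ++ "] " ++ pvWord w) := by
        simp [pvPieceB, pvLabel, hc]
      rw [hp]
      apply String.toList_injective
      simp [PySem.Str.join, PySem.Chars.join, List.intercalate]

-- ===== VERDICT (by name: the statement is the Claim_ definition above) =====
theorem format_context_words_py_spec : Claim_equal_format_context_words_py := by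
  intro words _ _
  unfold Spec_format_context_words_py format_context_words_py
  rw [pv_alt_eq]
  cases words with
  | nil => simp [pvChain, PySem.Str.join, PySem.Chars.join]; decide
  | cons w ws =>
    rw [if_neg (by simp)]
    rw [show pvLoopA (w :: ws) "" none []
          = pvLoopA ws "" (some (pvSpk w)) [pvWord w] by simp [pvLoopA]]
    rw [pv_loop_chain ws (pvSpk w) [pvWord w] "" (by simp)]
    rw [show pvChain none (w :: ws) = pvPieceB none w :: pvChain (some (pvSpk w)) ws from rfl]
    rw [pv_joinE_cons]
    have hp : pvPieceB none w = "[" ++ pvLabel (some (pvSpk w)) ++ "] " ++ pvWord w := by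
      simp [pvPieceB, pvLabel]
    rw [hp]
    apply congrArg
    apply String.toList_injective
    simp [PySem.Str.join, PySem.Chars.join, List.intercalate]
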